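-- pv_equiv track=rewrite | github.com/steverydz/adventofcode2024 | day-02/part-2/main.py | is_safe_decreasing
-- ===== SOURCE A (Python) =====
-- def is_decreasing(report):
--     levels = []
--
--     for level in report:
--         if levels and level >= levels[-1]:
--             return False
--
--         levels.append(level)
--
--     return True
--
-- def is_safe_decreasing(report):
--     if not is_decreasing(report):
--         return False
--
--     levels = []
--
--     for level in report:
--         if levels:
--             prev = levels[-1]
--
--             if prev - level < 1:
--                 return False
--
--             if prev - level > 3:
--                 return False
--
--         levels.append(level)
--
--     return True
-- ===== SOURCE B (Python) =====
-- def is_safe_decreasing(report):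
--     return all(1 <= a - b <= 3 for a, b in zip(report, report[1:]))
-- ===== Notes on version B (the rewrite author's own statement) =====
-- stated objective: simpler
-- what changed: Replaced the two-pass loop pair maintaining a growing `levels` list (one pass for strict decrease, one for the 1..3 step bound) with a single all() over adjacent pairs from zip, since a drop of at least 1 already implies strict decrease.
import Mathlib
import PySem

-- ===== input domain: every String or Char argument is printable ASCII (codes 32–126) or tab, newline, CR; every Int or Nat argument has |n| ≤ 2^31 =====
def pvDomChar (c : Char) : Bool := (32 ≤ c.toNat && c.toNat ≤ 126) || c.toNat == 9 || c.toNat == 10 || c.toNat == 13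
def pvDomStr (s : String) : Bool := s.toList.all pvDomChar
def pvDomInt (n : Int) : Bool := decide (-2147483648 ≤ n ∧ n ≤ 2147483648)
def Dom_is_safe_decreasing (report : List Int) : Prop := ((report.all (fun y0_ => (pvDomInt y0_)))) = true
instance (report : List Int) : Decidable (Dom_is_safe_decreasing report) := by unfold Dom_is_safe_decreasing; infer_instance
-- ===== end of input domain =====

-- B replaces A's two separate passes (strict-decrease, then step-bound, each carrying a
-- growing `levels` list) with one all() over adjacent zip pairs; objective: simpler.

-- ===== PORT A =====
-- loop of `is_decreasing`: carries the `levels` list, compares against levels[-1]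
def pvDecLoop (report : List Int) (levels : List Int) : Bool :=
  match report with
  | [] => true
  | level :: rest =>
    if !levels.isEmpty && decide (level ≥ levels.getLastD 0) then false
    else pvDecLoop rest (levels ++ [level])

def is_decreasing (report : List Int) : Bool := pvDecLoop report []

-- second loop of `is_safe_decreasing`: same `levels` list, checks 1 ≤ prev-level ≤ 3
def pvStepLoop (report : List Int) (levels : List Int) : Bool :=
  match report with
  | [] => true
  | level :: rest =>
    if !levels.isEmpty then
      let prev := levels.getLastD 0
      if decide (prev - level < 1) then false
      else if decide (prev - level > 3) then false
      else pvStepLoop rest (levels ++ [level])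
    else pvStepLoop rest (levels ++ [level])

def is_safe_decreasing (report : List Int) : Bool :=
  if !is_decreasing report then false
  else pvStepLoop report []

-- ===== PORT B =====
def is_safe_decreasing_alt (report : List Int) : Bool :=
  (report.zip (PySem.List.slice report (some 1) none)).all
    (fun ab => decide (1 ≤ ab.1 - ab.2) && decide (ab.1 - ab.2 ≤ 3))

-- ===== PRECONDITION & SPEC =====
def Spec_is_safe_decreasing (report : List Int) (out : Bool) : Prop := out = is_safe_decreasing_alt report
instance (report : List Int) (out : Bool) : Decidable (Spec_is_safe_decreasing report out) := by unfold Spec_is_safe_decreasing; infer_instance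

-- ===== CLAIM (what is proved, stated in full; the proofs are below) =====
def Claim_equal_is_safe_decreasing : Prop := ∀ (report : List Int), Dom_is_safe_decreasing report → Spec_is_safe_decreasing report (is_safe_decreasing report)

-- ===== LEMMAS AND PROOFS =====

-- pairwise predicates over cons-lists, used to characterise both ports
def pvStrict : List Int → Bool
  | a :: b :: rest => decide (a > b) && pvStrict (b :: rest)
  | _ => true

def pvStep : List Int → Bool
  | a :: b :: rest => decide (1 ≤ a - b) && decide (a - b ≤ 3) && pvStep (b :: rest)
  | _ => true

theorem pvDecLoop_char (report : List Int) :
    ∀ levels prev, levels ≠ [] → levels.getLastD 0 = prev →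
    pvDecLoop report levels = pvStrict (prev :: report) := by
  induction report with
  | nil => intro levels prev _ _; rfl
  | cons level rest ih =>
    intro levels prev hne hlast
    have he : levels.isEmpty = false := by simpa using hne
    simp only [pvDecLoop, pvStrict, he, hlast]
    by_cases h : level ≥ prev
    · simp [h, show ¬ prev > level by omega]
    · simp [h, show prev > level by omega,
        ih (levels ++ [level]) level (by simp) (by simp)]

theorem pvStepLoop_char (report : List Int) :
    ∀ levels prev, levels ≠ [] → levels.getLastD 0 = prev →
    pvStepLoop report levels = pvStep (prev :: report) := by
  induction report with
  | nil => intro levels prev _ _; rfl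
  | cons level rest ih =>
    intro levels prev hne hlast
    have he : levels.isEmpty = false := by simpa using hne
    simp only [pvStepLoop, pvStep, he, hlast]
    by_cases h1 : prev - level < 1
    · simp [h1, show ¬ 1 ≤ prev - level by omega]
    · by_cases h2 : prev - level > 3
      · simp [h1, h2, show ¬ prev - level ≤ 3 by omega]
      · simp [h1, h2, show 1 ≤ prev - level by omega, show prev - level ≤ 3 by omega,
          ih (levels ++ [level]) level (by simp) (by simp)]

theorem portA_char (report : List Int) :
    is_safe_decreasing report = (pvStrict report && pvStep report) := by
  unfold is_safe_decreasing is_decreasing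
  cases report with
  | nil => rfl
  | cons a rest =>
    simp only [pvDecLoop, pvStepLoop, List.isEmpty_nil, List.nil_append,
      pvDecLoop_char rest [a] a (by simp) (by simp),
      pvStepLoop_char rest [a] a (by simp) (by simp)]
    cases pvStrict (a :: rest) <;> simp

theorem pvStep_imp_strict (report : List Int) :
    pvStep report = true → pvStrict report = true := by
  induction report with
  | nil => intro _; rfl
  | cons a rest ih =>
    cases rest with
    | nil => intro _; rfl
    | cons b rest' =>
      simp only [pvStep, pvStrict, Bool.and_eq_true, decide_eq_true_eq]
      rintro ⟨⟨h1, _⟩, h3⟩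
      exact ⟨by omega, ih h3⟩

theorem portB_char (report : List Int) :
    is_safe_decreasing_alt report = pvStep report := by
  unfold is_safe_decreasing_alt
  induction report with
  | nil => rfl
  | cons a rest ih =>
    cases rest with
    | nil => rfl
    | cons b rest' =>
      rw [PySem.List.slice_from_one] at *
      simp only [List.tail_cons] at ih
      simp only [List.tail_cons, List.zip_cons_cons, List.all_cons, pvStep, ih,
        Bool.and_assoc]

-- ===== VERDICT (by name: the statement is the Claim_ definition above) =====
theorem is_safe_decreasing_spec : Claim_equal_is_safe_decreasing := by
  intro report _
  unfold Spec_is_safe_decreasing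
  rw [portA_char, portB_char]
  cases h : pvStep report with
  | true => simp [pvStep_imp_strict report h]
  | false => simp
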